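-- pv_equiv track=rewrite | github.com/hlucianojr1/blender-mcp | src/blender_mcp/color_grading.py | suggest_color_grade
-- ===== SOURCE A (Python) =====
-- def suggest_color_grade(scene_description: str, lighting_type: str = None) -> str:
--     """
--     Suggest appropriate color grade based on scene description and lighting.
--
--     Args:
--         scene_description: Description of scene/mood (e.g., "dramatic portrait", "product shot")
--         lighting_type: Optional lighting type (outdoor, indoor, studio, night, etc.)
--
--     Returns:
--         Recommended color grade preset key
--     """
--     desc_lower = scene_description.lower()
--
--     # Keyword matching
--     if any(word in desc_lower for word in ['product', 'commercial', 'advertising']):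
--         return "product_showcase"
--     elif any(word in desc_lower for word in ['action', 'blockbuster', 'dramatic action']):
--         return "blockbuster"
--     elif any(word in desc_lower for word in ['noir', 'mystery', 'detective']):
--         return "noir_classic"
--     elif any(word in desc_lower for word in ['vintage', 'retro', 'old', 'nostalgic']):
--         return "vintage_nostalgia"
--     elif any(word in desc_lower for word in ['dreamy', 'soft', 'pastel', 'ethereal']):
--         return "dreamy_pastel"
--     elif any(word in desc_lower for word in ['sci-fi', 'tech', 'futuristic', 'cyberpunk']):
--         return "sci_fi_cool"
--     elif any(word in desc_lower for word in ['moody', 'dark', 'atmospheric']):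
--         return "moody_portrait"
--     elif any(word in desc_lower for word in ['portrait', 'face', 'character']):
--         return "moody_portrait" if "dark" in desc_lower or "moody" in desc_lower else "cinematic_standard"
--     else:
--         return "cinematic_standard"
-- ===== SOURCE B (Python) =====
-- # Flat keyword->priority map; the answer is the preset of the MINIMUM priority
-- # among all matching keywords (aggregation instead of an ordered first-match
-- # chain).  The portrait/face/character branch of the original is behaviourally
-- # the default (its moody/dark case is shadowed by the earlier branch), so those
-- # keywords carry no preset of their own.
-- _KEYWORD_PRIORITY = {
--     "product": 0, "commercial": 0, "advertising": 0,
--     "action": 1, "blockbuster": 1, "dramatic action": 1,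
--     "noir": 2, "mystery": 2, "detective": 2,
--     "vintage": 3, "retro": 3, "old": 3, "nostalgic": 3,
--     "dreamy": 4, "soft": 4, "pastel": 4, "ethereal": 4,
--     "sci-fi": 5, "tech": 5, "futuristic": 5, "cyberpunk": 5,
--     "moody": 6, "dark": 6, "atmospheric": 6,
-- }
--
-- _PRESETS = ["product_showcase", "blockbuster", "noir_classic",
--             "vintage_nostalgia", "dreamy_pastel", "sci_fi_cool",
--             "moody_portrait", "cinematic_standard"]
--
--
-- def suggest_color_grade(scene_description: str, lighting_type: str = None) -> str:
--     desc_lower = scene_description.lower()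
--     best = min((p for kw, p in _KEYWORD_PRIORITY.items() if kw in desc_lower),
--                default=len(_PRESETS) - 1)
--     return _PRESETS[best]
-- ===== Notes on version B (the rewrite author's own statement) =====
-- stated objective: alternative
-- what changed: Replaces the ordered if/elif first-match chain by a flat keyword-to-priority map aggregated with min over all matching keywords and a final array lookup; the redundant portrait/face/character branch (its moody/dark case is shadowed) carries no keywords and falls to the default priority.
import Mathlib
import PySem

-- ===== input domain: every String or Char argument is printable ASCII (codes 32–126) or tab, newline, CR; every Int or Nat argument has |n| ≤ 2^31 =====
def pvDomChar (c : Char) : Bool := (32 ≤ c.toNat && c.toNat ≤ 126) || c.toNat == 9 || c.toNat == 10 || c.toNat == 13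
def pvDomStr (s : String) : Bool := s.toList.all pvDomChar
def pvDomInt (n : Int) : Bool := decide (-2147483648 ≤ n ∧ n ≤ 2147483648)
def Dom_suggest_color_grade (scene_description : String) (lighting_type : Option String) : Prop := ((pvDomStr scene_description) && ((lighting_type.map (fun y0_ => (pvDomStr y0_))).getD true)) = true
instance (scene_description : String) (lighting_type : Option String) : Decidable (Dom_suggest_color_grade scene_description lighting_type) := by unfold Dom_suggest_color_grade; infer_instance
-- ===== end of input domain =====

-- B replaces A's ordered if/elif first-match chain by a flat keyword->priority
-- map aggregated with min over all matching keywords plus a preset-array lookup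
-- (objective: alternative); the portrait branch, whose moody/dark case is
-- shadowed, carries no keywords and falls to the default priority.

-- ===== PORT A =====
def suggest_color_grade (scene_description : String) (lighting_type : Option String) : String :=
  let desc_lower := PySem.Str.lower scene_description
  if ["product", "commercial", "advertising"].any (fun w => PySem.Str.isIn w desc_lower) then
    "product_showcase"
  else if ["action", "blockbuster", "dramatic action"].any (fun w => PySem.Str.isIn w desc_lower) then
    "blockbuster"
  else if ["noir", "mystery", "detective"].any (fun w => PySem.Str.isIn w desc_lower) then
    "noir_classic"
  else if ["vintage", "retro", "old", "nostalgic"].any (fun w => PySem.Str.isIn w desc_lower) then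
    "vintage_nostalgia"
  else if ["dreamy", "soft", "pastel", "ethereal"].any (fun w => PySem.Str.isIn w desc_lower) then
    "dreamy_pastel"
  else if ["sci-fi", "tech", "futuristic", "cyberpunk"].any (fun w => PySem.Str.isIn w desc_lower) then
    "sci_fi_cool"
  else if ["moody", "dark", "atmospheric"].any (fun w => PySem.Str.isIn w desc_lower) then
    "moody_portrait"
  else if ["portrait", "face", "character"].any (fun w => PySem.Str.isIn w desc_lower) then
    (if PySem.Str.isIn "dark" desc_lower || PySem.Str.isIn "moody" desc_lower then
      "moody_portrait" else "cinematic_standard")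
  else
    "cinematic_standard"

-- ===== PORT B =====
def pvKeywordPriority : List (String × Nat) :=
  [("product", 0), ("commercial", 0), ("advertising", 0),
   ("action", 1), ("blockbuster", 1), ("dramatic action", 1),
   ("noir", 2), ("mystery", 2), ("detective", 2),
   ("vintage", 3), ("retro", 3), ("old", 3), ("nostalgic", 3),
   ("dreamy", 4), ("soft", 4), ("pastel", 4), ("ethereal", 4),
   ("sci-fi", 5), ("tech", 5), ("futuristic", 5), ("cyberpunk", 5),
   ("moody", 6), ("dark", 6), ("atmospheric", 6)]

def pvPresets : List String :=
  ["product_showcase", "blockbuster", "noir_classic", "vintage_nostalgia",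
   "dreamy_pastel", "sci_fi_cool", "moody_portrait", "cinematic_standard"]

def suggest_color_grade_alt (scene_description : String) (lighting_type : Option String) : String :=
  let desc_lower := PySem.Str.lower scene_description
  let best := pvKeywordPriority.foldl
    (fun acc kp => if PySem.Str.isIn kp.1 desc_lower then min acc kp.2 else acc)
    (pvPresets.length - 1)
  pvPresets.getD best "cinematic_standard"

-- ===== PRECONDITION & SPEC =====
def Spec_suggest_color_grade (scene_description : String) (lighting_type : Option String) (out : String) : Prop := out = suggest_color_grade_alt scene_description lighting_type
instance (scene_description : String) (lighting_type : Option String) (out : String) : Decidable (Spec_suggest_color_grade scene_description lighting_type out) := by unfold Spec_suggest_color_grade; infer_instance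

-- ===== CLAIM =====
def Claim_equal_suggest_color_grade : Prop := ∀ (scene_description : String) (lighting_type : Option String), Dom_suggest_color_grade scene_description lighting_type → Spec_suggest_color_grade scene_description lighting_type (suggest_color_grade scene_description lighting_type)

-- ===== LEMMAS AND PROOFS =====

-- folding one priority group of keywords equals a single any-test merged by min
theorem pvFoldGroup (d : String) (p acc : Nat) (ws : List String) (rest : List (String × Nat)) :
    (ws.map (fun w => (w, p)) ++ rest).foldl
        (fun acc kp => if PySem.Str.isIn kp.1 d then min acc kp.2 else acc) acc
      = rest.foldl (fun acc kp => if PySem.Str.isIn kp.1 d then min acc kp.2 else acc)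
          (if ws.any (fun w => PySem.Str.isIn w d) then min acc p else acc) := by
  induction ws generalizing acc with
  | nil => simp
  | cons w ws ih =>
      simp only [List.map_cons, List.cons_append, List.foldl_cons]
      rw [ih]
      congr 1
      cases h : PySem.Str.isIn w d <;>
        cases h2 : (ws.any fun w => PySem.Str.isIn w d) <;>
          rw [List.any_cons, h, h2] <;> simp [Nat.min_assoc]

-- ===== VERDICT =====
set_option maxHeartbeats 2000000 in
theorem suggest_color_grade_spec : Claim_equal_suggest_color_grade := by
  intro s _l _h
  unfold Spec_suggest_color_grade suggest_color_grade suggest_color_grade_alt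
  generalize PySem.Str.lower s = d
  have hfold : pvKeywordPriority
      = (["product", "commercial", "advertising"].map (fun w => (w, 0)))
        ++ (["action", "blockbuster", "dramatic action"].map (fun w => (w, 1)))
        ++ (["noir", "mystery", "detective"].map (fun w => (w, 2)))
        ++ (["vintage", "retro", "old", "nostalgic"].map (fun w => (w, 3)))
        ++ (["dreamy", "soft", "pastel", "ethereal"].map (fun w => (w, 4)))
        ++ (["sci-fi", "tech", "futuristic", "cyberpunk"].map (fun w => (w, 5)))
        ++ (["moody", "dark", "atmospheric"].map (fun w => (w, 6))) ++ ([] : List (String × Nat)) := by rfl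
  simp only [hfold, List.append_assoc, pvFoldGroup, List.foldl_nil, pvPresets,
    List.length_cons, List.length_nil]
  split_ifs <;> simp_all
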